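-- pv_equiv track=rewrite | github.com/MuhammadMaheem/programming-for-Ai-Lab | marks.py | hollow_square_with_line
-- ===== SOURCE A (Python) =====
-- def hollow_square_with_line(n):
--     if n < 1:
--         return ""
--     result = []
--     for i in range(n):
--         row = ""
--         for j in range(n):
--             if i == 0 or i == n - 1 or j == 0 or j == n - 1 or i == j:
--                 row += "* "
--             else:
--                 row += "  "
--         result.append(row)
--     return "\n".join(result)
-- ===== SOURCE B (Python) =====
-- def hollow_square_with_line(n):
--     if n < 1:
--         return ""
--     full = "* " * n
--     rows = [full]
--     for i in range(1, n - 1):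
--         rows.append("* " + "  " * (i - 1) + "* " + "  " * (n - 2 - i) + "* ")
--     if n > 1:
--         rows.append(full)
--     return "\n".join(rows)
-- ===== Notes on version B (the rewrite author's own statement) =====
-- stated objective: faster
-- what changed: Replaces A's per-cell conditional scan (n*n branch-and-concat iterations) with closed-form rows built by string repetition: a full border row and, for each middle row, '* ' + ' '*(i-1) + '* ' + ' '*(n-2-i) + '* ', joined at the end.
import Mathlib
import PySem

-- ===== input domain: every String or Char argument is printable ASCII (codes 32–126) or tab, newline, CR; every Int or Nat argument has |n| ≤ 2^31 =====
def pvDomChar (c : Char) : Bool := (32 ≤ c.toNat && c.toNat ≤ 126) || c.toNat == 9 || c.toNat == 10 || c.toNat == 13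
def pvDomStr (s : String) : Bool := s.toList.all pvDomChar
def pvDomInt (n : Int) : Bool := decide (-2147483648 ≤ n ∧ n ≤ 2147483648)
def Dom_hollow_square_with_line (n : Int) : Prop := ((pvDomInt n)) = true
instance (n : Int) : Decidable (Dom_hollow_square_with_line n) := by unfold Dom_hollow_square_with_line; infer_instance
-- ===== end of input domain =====

-- B replaces A's per-cell conditional scan by closed-form rows built with string repetition ("* " * n and
-- "  " * k strokes); measurably faster by a constant factor (no per-cell branch, bulk string building).

-- ===== PORT A =====
def hollow_square_with_line (n : Int) : String :=
  if n < 1 then "" else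
    String.ofList (PySem.Chars.join ['\n']
      ((PySem.List.pyRange 0 n 1).map (fun i =>
        (PySem.List.pyRange 0 n 1).foldl (fun row j =>
          if i = 0 ∨ i = n - 1 ∨ j = 0 ∨ j = n - 1 ∨ i = j
          then row ++ ['*', ' '] else row ++ [' ', ' ']) [])))

-- ===== PORT B =====
def hollow_square_with_line_alt (n : Int) : String :=
  if n < 1 then "" else
    let full := PySem.List.pyRepeat ['*', ' '] n
    let rows := full :: (PySem.List.pyRange 1 (n - 1) 1).map (fun i =>
      ['*', ' '] ++ PySem.List.pyRepeat [' ', ' '] (i - 1) ++ ['*', ' ']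
        ++ PySem.List.pyRepeat [' ', ' '] (n - 2 - i) ++ ['*', ' '])
    let rows := if 1 < n then rows ++ [full] else rows
    String.ofList (PySem.Chars.join ['\n'] rows)

-- ===== PRECONDITION & SPEC =====
def Spec_hollow_square_with_line (n : Int) (out : String) : Prop := out = hollow_square_with_line_alt n
instance (n : Int) (out : String) : Decidable (Spec_hollow_square_with_line n out) := by unfold Spec_hollow_square_with_line; infer_instance

-- ===== CLAIM (what is proved, stated in full; the proofs are below) =====
def Claim_equal_hollow_square_with_line : Prop := ∀ (n : Int), Dom_hollow_square_with_line n → Spec_hollow_square_with_line n (hollow_square_with_line n)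

-- ===== LEMMAS AND PROOFS =====

-- A's cell content at (i, j)
def pvCell (n i j : Int) : List Char :=
  if i = 0 ∨ i = n - 1 ∨ j = 0 ∨ j = n - 1 ∨ i = j then ['*', ' '] else [' ', ' ']

lemma flatMap_const_range (cs : List Char) (a b : Int) :
    (PySem.List.pyRange a b 1).flatMap (fun _ => cs) = PySem.List.pyRepeat cs (b - a) := by
  simp [List.flatMap_def, List.map_const', PySem.List.length_pyRange_one, PySem.List.pyRepeat]

lemma flatMap_cell_sp (n i a b : Int)
    (h : ∀ j, a ≤ j → j < b → pvCell n i j = [' ', ' ']) :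
    (PySem.List.pyRange a b 1).flatMap (pvCell n i) = PySem.List.pyRepeat [' ', ' '] (b - a) := by
  rw [List.flatMap_def, List.map_congr_left (g := fun _ => ([' ', ' '] : List Char)), ← List.flatMap_def,
    flatMap_const_range]
  intro j hj
  rw [PySem.List.mem_pyRange_one] at hj
  exact h j hj.1 hj.2

lemma row_border (n i : Int) (hi : i = 0 ∨ i = n - 1) :
    (PySem.List.pyRange 0 n 1).flatMap (pvCell n i) = PySem.List.pyRepeat ['*', ' '] n := by
  have : ∀ j ∈ PySem.List.pyRange 0 n 1, pvCell n i j = ['*', ' '] := by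
    intro j _; unfold pvCell; exact if_pos (by tauto)
  rw [List.flatMap_def, List.map_congr_left this, ← List.flatMap_def, flatMap_const_range]
  norm_num

lemma row_mid (n i : Int) (h1 : 1 ≤ i) (h2 : i ≤ n - 2) :
    (PySem.List.pyRange 0 n 1).flatMap (pvCell n i)
      = ['*', ' '] ++ PySem.List.pyRepeat [' ', ' '] (i - 1) ++ ['*', ' ']
        ++ PySem.List.pyRepeat [' ', ' '] (n - 2 - i) ++ ['*', ' '] := by
  rw [PySem.List.pyRange_one_append 0 1 n (by omega) (by omega),
      PySem.List.pyRange_one_append 1 i n (by omega) (by omega),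
      PySem.List.pyRange_one_append i (i + 1) n (by omega) (by omega),
      PySem.List.pyRange_one_append (i + 1) (n - 1) n (by omega) (by omega)]
  have e0 : PySem.List.pyRange 0 1 1 = [(0 : Int)] := by
    have := PySem.List.pyRange_one_singleton (a := (0 : Int)); simpa using this
  have e1 : PySem.List.pyRange i (i + 1) 1 = [i] := PySem.List.pyRange_one_singleton i
  have e2 : PySem.List.pyRange (n - 1) n 1 = [n - 1] := by
    have := PySem.List.pyRange_one_singleton (a := n - 1); simpa using this
  rw [e0, e1, e2]
  simp only [List.flatMap_append, List.flatMap_singleton]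
  rw [flatMap_cell_sp n i 1 i (by intro j hj1 hj2; unfold pvCell; exact if_neg (by omega)),
      flatMap_cell_sp n i (i + 1) (n - 1) (by intro j hj1 hj2; unfold pvCell; exact if_neg (by omega))]
  have c0 : pvCell n i 0 = ['*', ' '] := by unfold pvCell; exact if_pos (by tauto)
  have ci : pvCell n i i = ['*', ' '] := by unfold pvCell; exact if_pos (by tauto)
  have cl : pvCell n i (n - 1) = ['*', ' '] := by unfold pvCell; exact if_pos (by tauto)
  rw [c0, ci, cl]
  have : n - 1 - (i + 1) = n - 2 - i := by omega
  rw [this]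
  simp [List.append_assoc]

lemma rowA_eq_flatMap (n i : Int) :
    (PySem.List.pyRange 0 n 1).foldl (fun row j =>
        if i = 0 ∨ i = n - 1 ∨ j = 0 ∨ j = n - 1 ∨ i = j
        then row ++ ['*', ' '] else row ++ [' ', ' ']) []
      = (PySem.List.pyRange 0 n 1).flatMap (pvCell n i) := by
  have hf : (fun (row : List Char) (j : Int) =>
        if i = 0 ∨ i = n - 1 ∨ j = 0 ∨ j = n - 1 ∨ i = j
        then row ++ ['*', ' '] else row ++ [' ', ' '])
      = fun row j => row ++ pvCell n i j := by
    funext row j; unfold pvCell; split <;> rfl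
  rw [hf]
  simpa using PySem.List.foldl_append_eq_flatMap (pvCell n i) (PySem.List.pyRange 0 n 1) []

-- ===== VERDICT (by name: the statement is the Claim_ definition above) =====
theorem hollow_square_with_line_spec : Claim_equal_hollow_square_with_line := by
  unfold Claim_equal_hollow_square_with_line
  intro n _
  unfold Spec_hollow_square_with_line hollow_square_with_line hollow_square_with_line_alt
  by_cases hlt : n < 1
  · rw [if_pos hlt, if_pos hlt]
  · rw [if_neg hlt, if_neg hlt]
    congr 1
    congr 1
    by_cases h2 : n = 1
    · subst h2; decide
    · have hn2 : 2 ≤ n := by omega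
      rw [List.map_congr_left (fun i _ => rowA_eq_flatMap n i)]
      set g : Int → List Char := fun i => (PySem.List.pyRange 0 n 1).flatMap (pvCell n i) with hg
      have hsplit : PySem.List.pyRange 0 n 1
          = 0 :: (PySem.List.pyRange 1 (n - 1) 1 ++ [n - 1]) := by
        rw [PySem.List.pyRange_one_cons (by omega)]
        congr 1
        have hn1 : n = (n - 1) + 1 := by omega
        rw [hn1, PySem.List.pyRange_one_succ_right (by omega)]
        simp
      rw [if_pos (by omega)]
      conv_lhs => rw [hsplit]
      simp only [List.map_cons, List.map_append, List.map_nil]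
      have hg0 : g 0 = PySem.List.pyRepeat ['*', ' '] n := by
        rw [hg]; exact row_border n 0 (Or.inl rfl)
      have hgl : g (n - 1) = PySem.List.pyRepeat ['*', ' '] n := by
        rw [hg]; exact row_border n (n - 1) (Or.inr rfl)
      rw [hg0, hgl]
      congr 1
      show List.map g (PySem.List.pyRange 1 (n - 1) 1) ++ [PySem.List.pyRepeat ['*', ' '] n]
        = _ ++ [PySem.List.pyRepeat ['*', ' '] n]
      congr 1
      apply List.map_congr_left
      intro i hi
      rw [PySem.List.mem_pyRange_one] at hi
      rw [hg]
      exact row_mid n i (by omega) (by omega)
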